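-- pv_equiv track=rewrite | github.com/ai-meharbnsingh/astro_rattan | app/dosha_engine.py | _compute_yoga_strength
-- ===== SOURCE A (Python) =====
-- _YOGA_EXALT = {
--     "Sun": "Aries", "Moon": "Taurus", "Mars": "Capricorn",
--     "Mercury": "Virgo", "Jupiter": "Cancer", "Venus": "Pisces", "Saturn": "Libra",
-- }
--
-- _YOGA_DEBIL = {
--     "Sun": "Libra", "Moon": "Scorpio", "Mars": "Cancer",
--     "Mercury": "Pisces", "Jupiter": "Capricorn", "Venus": "Virgo", "Saturn": "Aries",
-- }
--
-- _YOGA_OWN = {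
--     "Sun": {"Leo"}, "Moon": {"Cancer"},
--     "Mars": {"Aries", "Scorpio"}, "Mercury": {"Gemini", "Virgo"},
--     "Jupiter": {"Sagittarius", "Pisces"}, "Venus": {"Taurus", "Libra"},
--     "Saturn": {"Capricorn", "Aquarius"},
-- }
--
-- def _compute_yoga_strength(yoga: dict, planets: dict) -> str:
--     """Compute yoga strength from dignity of its involved planets."""
--     involved = yoga.get("planets_involved") or []
--     if not involved:
--         return "moderate"
--     strong = sum(
--         1 for p in involved
--         if planets.get(p, {}).get("sign") == _YOGA_EXALT.get(p)
--     )
--     own = sum(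
--         1 for p in involved
--         if planets.get(p, {}).get("sign") in _YOGA_OWN.get(p, set())
--     )
--     weak = sum(
--         1 for p in involved
--         if planets.get(p, {}).get("sign") == _YOGA_DEBIL.get(p)
--     )
--     if strong >= 1:
--         return "strong"
--     if own >= 1 and weak == 0:
--         return "moderate"
--     if weak >= 1 and strong == 0:
--         return "weak"
--     return "moderate"
-- ===== SOURCE B (Python) =====
-- _DIGNITY = {
--     "Sun": ("Aries", "Libra"), "Moon": ("Taurus", "Scorpio"),
--     "Mars": ("Capricorn", "Cancer"), "Mercury": ("Virgo", "Pisces"),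
--     "Jupiter": ("Cancer", "Capricorn"), "Venus": ("Pisces", "Virgo"),
--     "Saturn": ("Libra", "Aries"),
-- }
--
--
-- def _compute_yoga_strength(yoga: dict, planets: dict) -> str:
--     """One early-exit pass over a merged exaltation/debilitation table.
--
--     A's own-sign count is dead code (both its branch and the fall-through
--     return 'moderate'), so only exaltation and debilitation are consulted.
--     """
--     has_debil = False
--     for p in (yoga.get("planets_involved") or []):
--         exalt, debil = _DIGNITY.get(p, (None, None))
--         sign = planets.get(p, {}).get("sign")
--         if sign == exalt:
--             return "strong"
--         if sign == debil:
--             has_debil = True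
--     return "weak" if has_debil else "moderate"
-- ===== Notes on version B (the rewrite author's own statement) =====
-- stated objective: simpler
-- what changed: A's own-sign count is dead code (its branch and the final fall-through both return 'moderate'), so B drops the _YOGA_OWN table entirely, merges exaltation and debilitation into one planet->(exalt,debil) table, and makes a single early-exit pass keeping only a has_debil flag instead of A's three counting comprehensions.
import Mathlib
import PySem

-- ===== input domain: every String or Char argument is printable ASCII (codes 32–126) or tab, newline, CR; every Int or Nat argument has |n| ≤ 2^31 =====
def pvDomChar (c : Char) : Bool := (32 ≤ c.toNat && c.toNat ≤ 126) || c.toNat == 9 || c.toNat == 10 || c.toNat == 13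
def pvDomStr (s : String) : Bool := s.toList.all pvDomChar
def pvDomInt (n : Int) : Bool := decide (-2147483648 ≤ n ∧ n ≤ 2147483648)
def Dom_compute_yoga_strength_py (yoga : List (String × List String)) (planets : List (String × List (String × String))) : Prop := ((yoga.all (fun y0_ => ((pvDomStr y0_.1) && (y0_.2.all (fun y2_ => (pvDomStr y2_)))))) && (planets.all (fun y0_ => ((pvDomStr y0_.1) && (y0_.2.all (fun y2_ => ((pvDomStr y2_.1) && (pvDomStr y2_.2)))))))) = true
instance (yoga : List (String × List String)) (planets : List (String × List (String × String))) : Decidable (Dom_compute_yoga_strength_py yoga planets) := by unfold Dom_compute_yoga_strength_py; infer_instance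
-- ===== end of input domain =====

-- B drops A's dead own-sign count and replaces the three counting passes by one early-exit
-- pass over a merged exaltation/debilitation table; same return value everywhere.

-- ===== PORT A =====
-- first-match association-list lookup (dict .get under the task's dict convention)
def pvAgetA {α : Type} (d : List (String × α)) (k : String) : Option α :=
  match d with
  | [] => none
  | (k', v) :: rest => if k' == k then some v else pvAgetA rest k

def pvExaltA : List (String × String) :=
  [("Sun","Aries"),("Moon","Taurus"),("Mars","Capricorn"),("Mercury","Virgo"),
   ("Jupiter","Cancer"),("Venus","Pisces"),("Saturn","Libra")]
def pvDebilA : List (String × String) :=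
  [("Sun","Libra"),("Moon","Scorpio"),("Mars","Cancer"),("Mercury","Pisces"),
   ("Jupiter","Capricorn"),("Venus","Virgo"),("Saturn","Aries")]
def pvOwnA : List (String × List String) :=
  [("Sun",["Leo"]),("Moon",["Cancer"]),("Mars",["Aries","Scorpio"]),("Mercury",["Gemini","Virgo"]),
   ("Jupiter",["Sagittarius","Pisces"]),("Venus",["Taurus","Libra"]),("Saturn",["Capricorn","Aquarius"])]

-- planets.get(p, {}).get("sign")
def pvSignA (planets : List (String × List (String × String))) (p : String) : Option String :=
  pvAgetA ((pvAgetA planets p).getD []) "sign"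

-- the three comprehension predicates (None == None is True in Python, matched by Option BEq)
def pvIsExaltA (planets : List (String × List (String × String))) (p : String) : Bool :=
  pvSignA planets p == pvAgetA pvExaltA p
def pvIsOwnA (planets : List (String × List (String × String))) (p : String) : Bool :=
  match pvSignA planets p with
  | some s => ((pvAgetA pvOwnA p).getD []).contains s
  | none => false
def pvIsDebilA (planets : List (String × List (String × String))) (p : String) : Bool :=
  pvSignA planets p == pvAgetA pvDebilA p

def compute_yoga_strength_py (yoga : List (String × List String)) (planets : List (String × List (String × String))) : String :=
  let involved := match pvAgetA yoga "planets_involved" with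
    | some l => if l.isEmpty then [] else l
    | none => []
  if involved.isEmpty then "moderate"
  else
    let strong := involved.countP (fun p => pvIsExaltA planets p)
    let own := involved.countP (fun p => pvIsOwnA planets p)
    let weak := involved.countP (fun p => pvIsDebilA planets p)
    if strong ≥ 1 then "strong"
    else if own ≥ 1 ∧ weak = 0 then "moderate"
    else if weak ≥ 1 ∧ strong = 0 then "weak"
    else "moderate"

-- ===== PORT B =====
-- dict .get as first-match find (Source B's dict lookups)
def pvFindB {α : Type} (d : List (String × α)) (k : String) : Option α :=
  (d.find? (fun kv => kv.1 == k)).map Prod.snd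

-- Source B's merged _DIGNITY table: planet ↦ (exaltation sign, debilitation sign)
def pvDignityB : List (String × String × String) :=
  [("Sun", ("Aries","Libra")), ("Moon", ("Taurus","Scorpio")),
   ("Mars", ("Capricorn","Cancer")), ("Mercury", ("Virgo","Pisces")),
   ("Jupiter", ("Cancer","Capricorn")), ("Venus", ("Pisces","Virgo")),
   ("Saturn", ("Libra","Aries"))]

-- Source B's single for-loop: early return "strong", accumulate has_debil
def pvLoopB (planets : List (String × List (String × String))) :
    List String → Bool → String
  | [], hasDebil => if hasDebil then "weak" else "moderate"
  | p :: rest, hasDebil =>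
    let dig := pvFindB pvDignityB p
    let sign := pvFindB ((pvFindB planets p).getD []) "sign"
    if sign == dig.map Prod.fst then "strong"
    else pvLoopB planets rest (hasDebil || (sign == dig.map Prod.snd))

def compute_yoga_strength_py_alt (yoga : List (String × List String)) (planets : List (String × List (String × String))) : String :=
  pvLoopB planets ((pvFindB yoga "planets_involved").getD []) false

-- ===== PRECONDITION & SPEC =====
def Spec_compute_yoga_strength_py (yoga : List (String × List String)) (planets : List (String × List (String × String))) (out : String) : Prop := out = compute_yoga_strength_py_alt yoga planets
instance (yoga : List (String × List String)) (planets : List (String × List (String × String))) (out : String) : Decidable (Spec_compute_yoga_strength_py yoga planets out) := by unfold Spec_compute_yoga_strength_py; infer_instance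

-- ===== CLAIM (what is proved, stated in full; the proofs are below) =====
def Claim_equal_compute_yoga_strength_py : Prop := ∀ (yoga : List (String × List String)) (planets : List (String × List (String × String))), Dom_compute_yoga_strength_py yoga planets → Spec_compute_yoga_strength_py yoga planets (compute_yoga_strength_py yoga planets)

-- ===== LEMMAS AND PROOFS =====

theorem pvFindB_eq {α : Type} (d : List (String × α)) (k : String) :
    pvFindB d k = pvAgetA d k := by
  induction d with
  | nil => rfl
  | cons h t ih =>
    simp only [pvFindB, pvAgetA, List.find?_cons] at *
    by_cases hk : h.1 == k
    · simp [hk]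
    · simp only [hk]; simpa [pvFindB] using ih

-- the merged table's projections agree with A's two separate tables, for every key
theorem dignity_fst (p : String) :
    (pvAgetA pvDignityB p).map Prod.fst = pvAgetA pvExaltA p := by
  simp only [pvDignityB, pvExaltA, pvAgetA]
  split_ifs <;> rfl

theorem dignity_snd (p : String) :
    (pvAgetA pvDignityB p).map Prod.snd = pvAgetA pvDebilA p := by
  simp only [pvDignityB, pvDebilA, pvAgetA]
  split_ifs <;> rfl

-- the loop computes the canonical branch on "any exalted / any debilitated"
theorem pvLoopB_spec (planets : List (String × List (String × String))) :
    ∀ (l : List String) (hd : Bool),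
      pvLoopB planets l hd =
        if l.any (pvIsExaltA planets) then "strong"
        else if hd || l.any (pvIsDebilA planets) then "weak"
        else "moderate" := by
  intro l
  induction l with
  | nil => intro hd; simp [pvLoopB]
  | cons p rest ih =>
    intro hd
    simp only [pvLoopB, pvFindB_eq, dignity_fst, dignity_snd, List.any_cons]
    have hE : (pvAgetA ((pvAgetA planets p).getD []) "sign" == pvAgetA pvExaltA p)
        = pvIsExaltA planets p := rfl
    have hD : (pvAgetA ((pvAgetA planets p).getD []) "sign" == pvAgetA pvDebilA p)
        = pvIsDebilA planets p := rfl
    rw [hE, hD, ih]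
    cases hex : pvIsExaltA planets p with
    | true => simp
    | false => simp [Bool.or_assoc]

theorem countP_pos_iff_any {α : Type} (l : List α) (f : α → Bool) :
    1 ≤ l.countP f ↔ l.any f = true := by
  rw [Nat.one_le_iff_ne_zero, Ne, List.countP_eq_zero, List.any_eq_true]
  constructor
  · intro h
    by_contra hc
    exact h (fun a ha hf => hc ⟨a, ha, hf⟩)
  · rintro ⟨a, ha, hf⟩ hall
    exact absurd hf (by simpa using hall a ha)

theorem countP_zero_iff_not_any {α : Type} (l : List α) (f : α → Bool) :
    l.countP f = 0 ↔ l.any f = false := by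
  simp [List.countP_eq_zero, List.any_eq_false]

-- ===== VERDICT (by name: the statement is the Claim_ definition above) =====
theorem compute_yoga_strength_py_spec : Claim_equal_compute_yoga_strength_py := by
  intro yoga planets _
  unfold Spec_compute_yoga_strength_py compute_yoga_strength_py compute_yoga_strength_py_alt
  rw [pvFindB_eq, pvLoopB_spec]
  have hinv : ((pvAgetA yoga "planets_involved").getD []) =
      (match pvAgetA yoga "planets_involved" with
       | some l => if l.isEmpty then [] else l
       | none => ([] : List String)) := by
    cases h : pvAgetA yoga "planets_involved" with
    | none => rfl
    | some l => cases l <;> simp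
  rw [hinv]
  generalize (match pvAgetA yoga "planets_involved" with
    | some l => if l.isEmpty then [] else l
    | none => ([] : List String)) = involved
  by_cases hemp : involved.isEmpty
  · have h0 : involved = [] := List.isEmpty_iff.mp hemp
    subst h0
    simp
  · simp only [if_neg hemp, Bool.false_or]
    have hEiff := countP_pos_iff_any involved (fun p => pvIsExaltA planets p)
    have hDiff := countP_pos_iff_any involved (fun p => pvIsDebilA planets p)
    have hEz := countP_zero_iff_not_any involved (fun p => pvIsExaltA planets p)
    have hDz := countP_zero_iff_not_any involved (fun p => pvIsDebilA planets p)
    split_ifs <;> simp_all
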